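-- pv_equiv track=rewrite | github.com/JoseHung/Speech-Recognition | assignment/[Asg-1][1155177751][Hong Shengzhe]/point_detection.py | calEnergy
-- ===== SOURCE A (Python) =====
-- def calEnergy(wave_data) :
--     energy = []
--     sum = 0
--     for i in range(len(wave_data)) :
--         sum = sum + (int(wave_data[i]) * int(wave_data[i]))
--         if (i + 1) % 512 == 0 :
--             energy.append(sum)
--             sum = 0
--         elif i == len(wave_data) - 1 :
--             energy.append(sum)
--     return energy
-- ===== SOURCE B (Python) =====
-- def calEnergy(wave_data):
--     return [sum(int(x) * int(x) for x in wave_data[start:start + 512])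
--             for start in range(0, len(wave_data), 512)]
-- ===== Notes on version B (the rewrite author's own statement) =====
-- stated objective: simpler
-- what changed: Replaces A's flat per-element loop with a running accumulator, a (i+1)%512 boundary test and a last-element elif by a single comprehension over frame starts range(0, n, 512), summing the squares of each 512-sample slice.
import Mathlib
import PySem

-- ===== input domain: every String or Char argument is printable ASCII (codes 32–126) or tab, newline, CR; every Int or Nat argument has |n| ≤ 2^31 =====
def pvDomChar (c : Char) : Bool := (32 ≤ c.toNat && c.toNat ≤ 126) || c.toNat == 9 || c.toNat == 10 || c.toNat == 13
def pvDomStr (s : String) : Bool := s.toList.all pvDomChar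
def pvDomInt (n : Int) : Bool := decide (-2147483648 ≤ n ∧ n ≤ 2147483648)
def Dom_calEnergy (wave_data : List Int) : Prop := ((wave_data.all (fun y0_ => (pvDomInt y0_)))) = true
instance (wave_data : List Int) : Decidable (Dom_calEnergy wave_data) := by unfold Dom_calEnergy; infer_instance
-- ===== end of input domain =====

-- B replaces A's flat per-element loop (running sum, (i+1)%512 boundary test, last-element elif)
-- by one comprehension over frame starts range(0, n, 512), summing the squares of each 512-sample
-- slice; objective: simpler.

-- ===== PORT A =====
def calEnergy (wave_data : List Int) : List Int :=
  ((PySem.List.pyRange 0 (PySem.List.len wave_data) 1).foldl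
    (fun (st : List Int × Int) i =>
      let s := st.2 + PySem.List.pyGetD wave_data i 0 * PySem.List.pyGetD wave_data i 0
      if PySem.Int.mod (i + 1) 512 = 0 then (st.1 ++ [s], 0)
      else if i = PySem.List.len wave_data - 1 then (st.1 ++ [s], s)
      else (st.1, s))
    ([], 0)).1

-- ===== PORT B =====
def calEnergy_alt (wave_data : List Int) : List Int :=
  (PySem.List.pyRange 0 (PySem.List.len wave_data) 512).map
    (fun start =>
      (PySem.List.slice wave_data (some start) (some (start + 512))).foldl
        (fun s x => s + x * x) 0)

-- ===== PRECONDITION & SPEC =====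
def Spec_calEnergy (wave_data : List Int) (out : List Int) : Prop := out = calEnergy_alt wave_data
instance (wave_data : List Int) (out : List Int) : Decidable (Spec_calEnergy wave_data out) := by unfold Spec_calEnergy; infer_instance

-- ===== CLAIM (what is proved, stated in full; the proofs are below) =====
def Claim_equal_calEnergy : Prop := ∀ (wave_data : List Int), Dom_calEnergy wave_data → Spec_calEnergy wave_data (calEnergy wave_data)

-- ===== LEMMAS AND PROOFS =====

-- common reference value: sum of squares of each consecutive 512-element chunk
def pvSumSq (xs : List Int) : Int := xs.foldl (fun s x => s + x * x) 0

def pvChunks (xs : List Int) : List Int :=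
  if xs = [] then [] else pvSumSq (xs.take 512) :: pvChunks (xs.drop 512)
termination_by xs.length
decreasing_by
  rename_i h
  have : xs.length ≠ 0 := fun h0 => h (List.length_eq_zero_iff.mp h0)
  simp [List.length_drop]; omega

-- A's loop body, rephrased over a Nat index
def pvBodyA (xs : List Int) (st : List Int × Int) (k : Nat) : List Int × Int :=
  let s := st.2 + xs.getD k 0 * xs.getD k 0
  if (k + 1) % 512 = 0 then (st.1 ++ [s], 0)
  else if k = xs.length - 1 then (st.1 ++ [s], s)
  else (st.1, s)

lemma pvA_bridge (xs : List Int) :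
    calEnergy xs = ((List.range xs.length).foldl (pvBodyA xs) ([], 0)).1 := by
  unfold calEnergy
  rw [PySem.List.pyRange_one]
  have hlen : ((PySem.List.len xs : Int) - 0).toNat = xs.length := by
    simp [PySem.List.len_eq]
  rw [hlen, List.foldl_map]
  congr 1
  apply PySem.List.foldl_congr_mem
  intro st k hk
  have hk' : k < xs.length := List.mem_range.mp hk
  unfold pvBodyA
  have h1 : PySem.List.pyGetD xs ((0 : Int) + (k : Int)) 0 = xs.getD k 0 := by
    simp [PySem.List.pyGetD_natCast]
  have h2 : PySem.Int.mod ((0 : Int) + (k : Int) + 1) 512 = (((k + 1) % 512 : Nat) : Int) := by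
    have := PySem.Int.mod_natCast (k + 1) 512
    simpa [Int.natCast_add] using this
  have h3 : (PySem.Int.mod ((0 : Int) + (k : Int) + 1) 512 = 0) ↔ ((k + 1) % 512 = 0) := by
    rw [h2]; exact_mod_cast Iff.rfl
  have h4 : (((0 : Int) + (k : Int)) = PySem.List.len xs - 1) ↔ (k = xs.length - 1) := by
    simp only [PySem.List.len_eq]
    omega
  simp only [h1, h3, h4]

-- prefix of a frame: while neither condition fires, the loop just accumulates
lemma pvA_accum (xs : List Int) (e : List Int) :
    ∀ (k : Nat), k ≤ 511 → k < xs.length → ∀ (s : Int),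
    (List.range k).foldl (pvBodyA xs) (e, s) = (e, (xs.take k).foldl (fun a x => a + x * x) s) := by
  intro k
  induction k with
  | zero => intro _ _ s; simp
  | succ k ih =>
    intro hk hlen s
    rw [List.range_succ, List.foldl_append, ih (by omega) (by omega) s]
    have hkl : k < xs.length := by omega
    have hget : xs.getD k 0 = xs[k] := List.getD_eq_getElem xs 0 hkl
    have htake : xs.take (k + 1) = xs.take k ++ [xs[k]] := by
      rw [List.take_succ]; simp [List.getElem?_eq_getElem hkl]
    unfold pvBodyA
    have hc1 : ¬ ((k + 1) % 512 = 0) := by omega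
    have hc2 : ¬ (k = xs.length - 1) := by omega
    simp only [List.foldl_cons, List.foldl_nil, hc1, hc2, if_false, htake,
      List.foldl_append, hget]

-- a complete terminal frame (1 ≤ L ≤ 512): one append, of the squares of the whole list
lemma pvA_last (xs : List Int) (e : List Int) (h1 : 1 ≤ xs.length) (h2 : xs.length ≤ 512) :
    ((List.range xs.length).foldl (pvBodyA xs) (e, 0)).1 = e ++ [pvSumSq xs] := by
  obtain ⟨L', hL⟩ : ∃ L', xs.length = L' + 1 := ⟨xs.length - 1, by omega⟩
  rw [hL, List.range_succ, List.foldl_append,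
    pvA_accum xs e L' (by omega) (by omega) 0]
  have hL' : L' < xs.length := by omega
  have hget : xs.getD L' 0 = xs[L'] := List.getD_eq_getElem xs 0 hL'
  have hx : xs.take (L' + 1) = xs := by rw [← hL]; exact List.take_of_length_le (le_refl _)
  have htake : xs.take (L' + 1) = xs.take L' ++ [xs[L']] := by
    rw [List.take_succ]; simp [List.getElem?_eq_getElem hL']
  have hsum : pvSumSq xs = (xs.take L').foldl (fun a x => a + x * x) 0 + xs[L'] * xs[L'] := by
    unfold pvSumSq
    conv_lhs => rw [← hx, htake]
    rw [List.foldl_append]; simp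
  unfold pvBodyA
  simp only [List.foldl_cons, List.foldl_nil]
  by_cases hb : (L' + 1) % 512 = 0
  · rw [if_pos hb]; simp [hsum, List.getElem?_eq_getElem hL']
  · rw [if_neg hb, if_pos (show L' = xs.length - 1 by omega)]
    simp [hsum, List.getElem?_eq_getElem hL']

-- a full non-terminal frame: the first 512 steps append one sum and reset the accumulator
lemma pvA_chunk512 (xs : List Int) (e : List Int) (h : 512 < xs.length) :
    (List.range 512).foldl (pvBodyA xs) (e, 0) = (e ++ [pvSumSq (xs.take 512)], 0) := by
  have h511 : (511 : Nat) < xs.length := by omega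
  rw [show (512 : Nat) = 511 + 1 from rfl, List.range_succ, List.foldl_append,
    pvA_accum xs e 511 (by omega) h511 0]
  have hget : xs.getD 511 0 = xs[511] := List.getD_eq_getElem xs 0 h511
  have htake : xs.take 512 = xs.take 511 ++ [xs[511]] := by
    rw [show (512 : Nat) = 511 + 1 from rfl, List.take_succ]
    simp [List.getElem?_eq_getElem h511]
  have hsum : pvSumSq (xs.take 512)
      = (xs.take 511).foldl (fun a x => a + x * x) 0 + xs[511] * xs[511] := by
    unfold pvSumSq; rw [htake, List.foldl_append]; simp
  unfold pvBodyA
  simp only [List.foldl_cons, List.foldl_nil, hget, hsum]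
  norm_num

-- shifting the index by 512 is running A's body on the 512-dropped list
lemma pvBodyA_shift (xs : List Int) (h : 512 < xs.length) (st : List Int × Int) (j : Nat) :
    pvBodyA xs st (512 + j) = pvBodyA (xs.drop 512) st j := by
  have hget : xs.getD (512 + j) 0 = (xs.drop 512).getD j 0 := by
    simp [List.getD, List.getElem?_drop]
  have hmod : (512 + j + 1) % 512 = (j + 1) % 512 := by omega
  have hlast : ((512 + j = xs.length - 1)) ↔ (j = (xs.drop 512).length - 1) := by
    simp only [List.length_drop]; omega
  unfold pvBodyA
  simp only [hget, hmod, hlast]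

lemma pvA_main : ∀ (L : Nat) (xs : List Int), xs.length = L → ∀ (e : List Int),
    ((List.range xs.length).foldl (pvBodyA xs) (e, 0)).1 = e ++ pvChunks xs := by
  intro L
  induction L using Nat.strong_induction_on with
  | _ L ih =>
    intro xs hL e
    by_cases h0 : xs = []
    · subst h0; simp [pvChunks]
    · have hpos : 1 ≤ xs.length := by
        have := List.length_pos_iff.mpr h0; omega
      rw [pvChunks, if_neg h0]
      by_cases h512 : xs.length ≤ 512
      · rw [pvA_last xs e hpos h512]
        have ht : xs.take 512 = xs := List.take_of_length_le h512
        have hd : xs.drop 512 = [] := List.drop_eq_nil_of_le h512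
        rw [ht, hd, pvChunks]; simp
      · have hgt : 512 < xs.length := by omega
        have hsplit : xs.length = 512 + (xs.length - 512) := by omega
        rw [hsplit, List.range_add, List.foldl_append, pvA_chunk512 xs e hgt,
          List.foldl_map]
        have hbody : (fun (st : List Int × Int) (j : Nat) => pvBodyA xs st (512 + j))
            = pvBodyA (xs.drop 512) := by
          funext st j; exact pvBodyA_shift xs hgt st j
        rw [hbody]
        have hdl : (xs.drop 512).length = xs.length - 512 := by simp
        have := ih (xs.length - 512) (by omega) (xs.drop 512) hdl (e ++ [pvSumSq (xs.take 512)])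
        rw [← hdl, this]
        simp

-- B: the comprehension over frame starts computes the same chunk sums
lemma pvB_chunks : ∀ (L : Nat) (xs : List Int), xs.length = L →
    (List.range ((L + 511) / 512)).map
      (fun k => pvSumSq ((xs.drop (512 * k)).take 512)) = pvChunks xs := by
  intro L
  induction L using Nat.strong_induction_on with
  | _ L ih =>
    intro xs hL
    by_cases h0 : L = 0
    · subst h0
      have : xs = [] := List.length_eq_zero_iff.mp hL
      subst this
      simp [pvChunks]
    · have hC : (L + 511) / 512 = ((L + 511) / 512 - 1) + 1 := by omega
      rw [hC, List.range_succ_eq_map, List.map_cons, List.map_map]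
      have hxs : xs ≠ [] := by
        intro h; rw [h] at hL; simp at hL; omega
      rw [pvChunks, if_neg hxs]
      congr 1
      have hshift : (fun k => pvSumSq ((xs.drop (512 * k)).take 512)) ∘ Nat.succ
          = fun k => pvSumSq (((xs.drop 512).drop (512 * k)).take 512) := by
        funext k
        have hm : 512 * Nat.succ k = 512 + 512 * k := by omega
        simp only [Function.comp_apply, List.drop_drop, hm]
      rw [hshift]
      have hdl : (xs.drop 512).length = L - 512 := by simp [hL]
      have hC' : (L + 511) / 512 - 1 = ((L - 512) + 511) / 512 := by omega
      rw [hC', ih (L - 512) (by omega) (xs.drop 512) hdl]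

lemma pvB_bridge (xs : List Int) : calEnergy_alt xs = pvChunks xs := by
  unfold calEnergy_alt
  rw [PySem.List.pyRange_of_pos 0 (PySem.List.len xs) (by norm_num)]
  rw [List.map_map]
  have hn : (PySem.List.len xs : Int) = (xs.length : Int) := by simp [PySem.List.len_eq]
  have hcount : (if (0 : Int) < PySem.List.len xs
      then (((PySem.List.len xs : Int) - 0 + 512 - 1) / 512).toNat else 0)
      = (xs.length + 511) / 512 := by
    rw [hn]
    by_cases h : 0 < xs.length
    · rw [if_pos (by exact_mod_cast h)]
      omega
    · have h0 : xs.length = 0 := by omega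
      rw [h0]; simp
  rw [hcount]
  rw [← pvB_chunks xs.length xs rfl]
  apply List.map_congr_left
  intro k hk
  simp only [Function.comp_apply]
  have hstart : (0 : Int) + 512 * (k : Int) = ((512 * k : Nat) : Int) := by push_cast; ring
  have h512 : ((512 * k : Nat) : Int) + 512 = ((512 * k : Nat) : Int) + ((512 : Nat) : Int) := by
    norm_num
  rw [hstart, h512, PySem.List.slice_natCast_add]
  rfl

-- ===== VERDICT (by name: the statement is the Claim_ definition above) =====
theorem calEnergy_spec : Claim_equal_calEnergy := by
  intro xs _
  unfold Spec_calEnergy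
  rw [pvA_bridge xs, pvA_main xs.length xs rfl [], pvB_bridge xs]
  simp
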